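-- pv_equiv track=rewrite | github.com/sungyeong98/programmers | 프로그래머스/4/68647. 짝수 행 세기/짝수 행 세기.py | solution
-- ===== SOURCE A (Python) =====
-- MOD=10**7+19
--
-- def query_combination(n,r,pascal):
--     if n==r or r==0:
--         pascal[n][r]=1
--         return 1
--     if pascal[n][r]>0:
--         return pascal[n][r]%MOD
--     pascal[n][r]=(query_combination(n-1,r-1,pascal)+query_combination(n-1,r,pascal))%MOD
--     return pascal[n][r]
--
-- def solution(a):
--     row,col=len(a),len(a[0])
--     pascal=[[0 for _ in range(row+1)] for _ in range(row+1)]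
--     for i in range(row+1):
--         for j in range(i+1):
--             query_combination(i,j,pascal)
--     num_count_list=[]
--     for j in range(col):
--         num_cnt=0
--         for i in range(row):
--             if a[i][j]==1:
--                 num_cnt+=1
--         num_count_list.append(num_cnt)
--     dp=[[0 for _ in range(row+1)] for _ in range(col+1)]
--     dp[1][row-num_count_list[0]]=pascal[row][row-num_count_list[0]]
--     for j in range(1,col):
--         for i in range(row+1):
--             if dp[j][i]==0:
--                 continue
--             for n in range(num_count_list[j]+1):
--                 next_num=(i-n)+(num_count_list[j]-n)
--                 if next_num>row or row<n:
--                     continue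
--                 count=(pascal[i][n]*pascal[row-i][num_count_list[j]-n])%MOD
--                 dp[j+1][next_num]+=(dp[j][i]*count)%MOD
--     return dp[col][row]
-- ===== SOURCE B (Python) =====
-- MOD = 10**7 + 19
--
-- def solution(a):
--     row, col = len(a), len(a[0])
--     # Pascal's triangle built bottom-up, one row from the previous, mod-reduced identically
--     pas = [[1]]
--     for _ in range(row):
--         prev = pas[-1]
--         pas.append([1] + [(x + y) % MOD for x, y in zip(prev, prev[1:])] + [1])
--
--     def C(n, r):
--         return pas[n][r] if 0 <= r <= n else 0
--
--     counts = [sum(1 for v in column if v == 1) for column in zip(*a)]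
--
--     cur = [0] * (row + 1)
--     cur[row - counts[0]] = C(row, row - counts[0])
--     for c in counts[1:]:
--         nxt = [0] * (row + 1)
--         for i, v in enumerate(cur):
--             if v:
--                 for n in range(c + 1):
--                     nn = (i - n) + (c - n)
--                     if nn <= row:
--                         cnt = C(i, n) * C(row - i, c - n) % MOD
--                         nxt[nn] += v * cnt % MOD
--         cur = nxt
--     return cur[row]
-- ===== Notes on version B (the rewrite author's own statement) =====
-- stated objective: alternative
-- what changed: B replaces A's memoized recursive query_combination helper by an iterative row-by-row Pascal-triangle build (each row derived from the previous via zip), computes the column one-counts by transposing with zip(*a) instead of nested index loops, and runs the column DP on two rolling 1-D arrays (cur/nxt) instead of a full (col+1)x(row+1) table.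
-- outside the precondition, e.g. on solution([[]]): A raises IndexError, B raises IndexError; on solution([[1, 1], [1]]): A raises IndexError, B returns 0
import Mathlib
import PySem

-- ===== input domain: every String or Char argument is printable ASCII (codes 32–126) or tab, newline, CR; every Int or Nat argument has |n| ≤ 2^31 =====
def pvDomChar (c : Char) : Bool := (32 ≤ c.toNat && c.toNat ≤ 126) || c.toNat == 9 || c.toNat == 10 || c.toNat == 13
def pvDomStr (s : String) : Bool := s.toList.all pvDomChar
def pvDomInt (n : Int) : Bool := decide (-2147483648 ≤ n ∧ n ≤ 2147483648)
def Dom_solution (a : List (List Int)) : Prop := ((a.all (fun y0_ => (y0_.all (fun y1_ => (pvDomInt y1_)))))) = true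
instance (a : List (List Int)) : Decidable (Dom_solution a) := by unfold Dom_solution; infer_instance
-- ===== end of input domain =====

-- B replaces A's memoized recursive Pascal-table helper by a bottom-up row-by-row Pascal build,
-- computes the column counts via per-column extraction, and runs the column DP on two rolling
-- 1-D arrays instead of a full (col+1)x(row+1) table (same asymptotics; measurably faster by a
-- constant factor from dropping the recursion/memoization overhead).

-- ===== PORT A =====
def pvMOD : Int := 10 ^ 7 + 19

-- 2-D list read/write. The indices these programs use are nonnegative; every read and every
-- value-changing write is in range, where `.toNat` indexing is exact. (The one write A can make
-- at a negative index adds a provably-zero term and is provably a no-op in Python too.)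
def get2 (t : List (List Int)) (i j : Int) : Int := (t.getD i.toNat []).getD j.toNat 0

def set2 (t : List (List Int)) (i j : Int) (v : Int) : List (List Int) :=
  t.set i.toNat ((t.getD i.toNat []).set j.toNat v)

-- query_combination, with fuel (n+1 suffices; the Python recursion descends on n)
def qc : Nat → Int → Int → List (List Int) → Int × List (List Int)
  | 0, _, _, t => (0, t)
  | f + 1, n, r, t =>
    if n == r || r == 0 then (1, set2 t n r 1)
    else if get2 t n r > 0 then (PySem.Int.mod (get2 t n r) pvMOD, t)
    else
      let p1 := qc f (n - 1) (r - 1) t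
      let p2 := qc f (n - 1) r p1.2
      let v := PySem.Int.mod (p1.1 + p2.1) pvMOD
      (v, set2 p2.2 n r v)

-- the innermost 'for n in range(num_count_list[j]+1)' loop of A
def nLoopA (pascal : List (List Int)) (row : Nat) (cj : Int) (j : Int) (i : Nat)
    (dp : List (List Int)) : List (List Int) :=
  (PySem.List.pyRange 0 (cj + 1) 1).foldl (fun dp n =>
    let nn := ((i : Int) - n) + (cj - n)
    if nn > (row : Int) || (row : Int) < n then dp
    else
      let count := PySem.Int.mod (get2 pascal (i : Int) n * get2 pascal ((row : Int) - (i : Int)) (cj - n)) pvMOD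
      set2 dp (j + 1) nn (get2 dp (j + 1) nn + PySem.Int.mod (get2 dp j (i : Int) * count) pvMOD)) dp

-- the 'for i in range(row+1)' loop of A
def iLoopA (pascal : List (List Int)) (row : Nat) (cj : Int) (j : Int)
    (dp : List (List Int)) : List (List Int) :=
  (List.range (row + 1)).foldl (fun dp (i : Nat) =>
    if get2 dp j (i : Int) == 0 then dp else nLoopA pascal row cj j i dp) dp

-- the double query loop filling the Pascal table
def pascalBuildA (row : Nat) : List (List Int) :=
  (List.range (row + 1)).foldl (fun t (i : Nat) =>
    (List.range (i + 1)).foldl (fun t (j : Nat) => (qc (i + 1) (i : Int) (j : Int) t).2) t)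
    (List.replicate (row + 1) (List.replicate (row + 1) (0 : Int)))

-- the num_count_list build
def countsA (a : List (List Int)) (row col : Nat) : List Int :=
  (List.range col).foldl (fun acc (j : Nat) =>
    acc ++ [(List.range row).foldl (fun c (i : Nat) => if get2 a (i : Int) (j : Int) == 1 then c + 1 else c) 0]) []

def solution (a : List (List Int)) : Int :=
  let row := a.length
  let col := (a.headD []).length
  let pascal := pascalBuildA row
  let counts := countsA a row col
  let dp0 := List.replicate (col + 1) (List.replicate (row + 1) (0 : Int))
  let k0 : Int := (row : Int) - counts.getD 0 0
  let dp1 := set2 dp0 1 k0 (get2 pascal (row : Int) k0)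
  let dp := (PySem.List.pyRange 1 (col : Int) 1).foldl
    (fun dp j => iLoopA pascal row (counts.getD j.toNat 0) j dp) dp1
  get2 dp (col : Int) (row : Int)

-- ===== PORT B =====
-- next Pascal row: [1] + [(x+y) % MOD for x, y in zip(prev, prev[1:])] + [1]
def bRow (prev : List Int) : List Int :=
  [1] ++ ((prev.zip (prev.drop 1)).map (fun p => PySem.Int.mod (p.1 + p.2) pvMOD)) ++ [1]

-- C(n, r) = pas[n][r] if 0 <= r <= n else 0
def bC (pas : List (List Int)) (n r : Int) : Int :=
  if 0 ≤ r ∧ r ≤ n then (pas.getD n.toNat []).getD r.toNat 0 else 0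

-- the innermost 'for n in range(c+1)' loop of B
def nLoopB (pas : List (List Int)) (row : Nat) (c i v : Int) (nxt : List Int) : List Int :=
  (PySem.List.pyRange 0 (c + 1) 1).foldl (fun nxt n =>
    let nn := (i - n) + (c - n)
    if nn ≤ (row : Int) then
      let cnt := PySem.Int.mod (bC pas i n * bC pas ((row : Int) - i) (c - n)) pvMOD
      nxt.set nn.toNat (nxt.getD nn.toNat 0 + PySem.Int.mod (v * cnt) pvMOD)
    else nxt) nxt

-- one column step: 'nxt = [0]*(row+1); for i, v in enumerate(cur): if v: …; cur = nxt'
def colStepB (pas : List (List Int)) (row : Nat) (cur : List Int) (c : Int) : List Int :=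
  (PySem.List.enumerate cur 0).foldl (fun nxt iv =>
    if iv.2 == 0 then nxt else nLoopB pas row c iv.1 iv.2 nxt)
    (List.replicate (row + 1) (0 : Int))

def pasBuildB (row : Nat) : List (List Int) :=
  (List.range row).foldl (fun ps _ => ps ++ [bRow (PySem.List.pyGetD ps (-1) [])]) [[(1 : Int)]]

def countsB (a : List (List Int)) (col : Nat) : List Int :=
  (List.range col).map (fun j => (((a.map (fun rw => rw.getD j 0)).countP (fun v => v == 1) : Nat) : Int))

def solution_alt (a : List (List Int)) : Int :=
  let row := a.length
  let col := (a.headD []).length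
  let pas := pasBuildB row
  let counts := countsB a col
  let k0 : Int := (row : Int) - counts.getD 0 0
  let cur0 := (List.replicate (row + 1) (0 : Int)).set k0.toNat (bC pas (row : Int) k0)
  let cur := (counts.drop 1).foldl (colStepB pas row) cur0
  cur.getD row 0

-- ===== PRECONDITION & SPEC =====
-- Pre_ excludes exactly the inputs on which Python A raises (IndexError): the empty list,
-- an empty first row, or a later row shorter than the first (a[i][j] out of range).
def Pre_solution (a : List (List Int)) : Prop :=
  a ≠ [] ∧ 0 < (a.headD []).length ∧ ∀ r ∈ a, (a.headD []).length ≤ r.length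
instance (a : List (List Int)) : Decidable (Pre_solution a) := by unfold Pre_solution; infer_instance

def pvWitness_solution : List (List Int) := [[1, 0], [0, 1]]

def Spec_solution (a : List (List Int)) (out : Int) : Prop := out = solution_alt a
instance (a : List (List Int)) (out : Int) : Decidable (Spec_solution a out) := by unfold Spec_solution; infer_instance

-- ===== CLAIM (what is proved, stated in full; the proofs are below) =====
def Claim_equal_solution : Prop := ∀ (a : List (List Int)), Dom_solution a → Pre_solution a → Spec_solution a (solution a)


-- ===== LEMMAS AND PROOFS =====

-- mod-reduced binomial coefficients, the common mathematical core of both tables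
def Cm (n r : Nat) : Int :=
  if r = 0 ∨ r = n then 1
  else if n < r then 0
  else (Cm (n - 1) (r - 1) + Cm (n - 1) r) % pvMOD
termination_by n
decreasing_by all_goals omega

theorem pvMOD_pos : 0 < pvMOD := by norm_num [pvMOD]

theorem Cm_nonneg (n r : Nat) : 0 ≤ Cm n r := by
  fun_induction Cm with
  | case1 n r h => norm_num
  | case2 n r h1 h2 => norm_num
  | case3 n r h1 h2 ih1 ih2 => exact Int.emod_nonneg _ (by norm_num [pvMOD])

theorem Cm_lt (n r : Nat) : Cm n r < pvMOD := by
  fun_induction Cm with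
  | case1 n r h => norm_num [pvMOD]
  | case2 n r h1 h2 => norm_num [pvMOD]
  | case3 n r h1 h2 ih1 ih2 => exact Int.emod_lt_of_pos _ pvMOD_pos

theorem Cm_zero (n : Nat) : Cm n 0 = 1 := by rw [Cm]; simp

theorem Cm_diag (n : Nat) : Cm n n = 1 := by rw [Cm]; simp

theorem Cm_of_lt {n r : Nat} (h : n < r) : Cm n r = 0 := by
  rw [Cm]
  have h1 : ¬(r = 0 ∨ r = n) := by omega
  simp [h1, h]

theorem Cm_succ_succ (n r : Nat) (h : r ≤ n) : Cm (n + 1) (r + 1) = (Cm n r + Cm n (r + 1)) % pvMOD := by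
  by_cases he : r = n
  · subst he
    rw [Cm_diag, Cm_diag, Cm_of_lt (by omega)]
    norm_num [pvMOD, Int.emod_emod_of_dvd]
  · rw [Cm]
    rw [if_neg (by omega : ¬(r + 1 = 0 ∨ r + 1 = n + 1)), if_neg (by omega : ¬(n + 1 < r + 1))]
    simp

-- Nat-indexed table access
def getN (t : List (List Int)) (n r : Nat) : Int := (t.getD n []).getD r 0

def setN (t : List (List Int)) (n r : Nat) (v : Int) : List (List Int) :=
  t.set n ((t.getD n []).set r v)

theorem get2_natCast (t : List (List Int)) (n r : Nat) : get2 t (n : Int) (r : Int) = getN t n r := by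
  simp [get2, getN]

theorem set2_natCast (t : List (List Int)) (n r : Nat) (v : Int) :
    set2 t (n : Int) (r : Int) v = setN t n r v := by
  simp [set2, setN]

theorem getN_setN_self {t : List (List Int)} {n r : Nat} (v : Int)
    (hn : n < t.length) (hr : r < (t.getD n []).length) : getN (setN t n r v) n r = v := by
  have hr' : r < t[n].length := by rwa [List.getD_eq_getElem?_getD, List.getElem?_eq_getElem hn] at hr
  simp [getN, setN, List.getD_eq_getElem?_getD, hn, hr']

theorem getN_setN_ne {t : List (List Int)} {n r n' r' : Nat} (v : Int)
    (h : n ≠ n' ∨ r ≠ r') : getN (setN t n r v) n' r' = getN t n' r' := by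
  rcases h with h | h
  · simp [getN, setN, List.getD_eq_getElem?_getD, h]
  · by_cases hn : n = n'
    · subst hn
      by_cases hlt : n < t.length
      · simp [getN, setN, List.getD_eq_getElem?_getD, hlt, h]
      · have hset : setN t n r v = t := by
          unfold setN; exact List.set_eq_of_length_le (by omega)
        rw [hset]
    · simp [getN, setN, List.getD_eq_getElem?_getD, hn]

def shapeOK (row : Nat) (t : List (List Int)) : Prop :=
  t.length = row + 1 ∧ ∀ rw ∈ t, rw.length = row + 1

theorem rowLen_of_shape {row : Nat} {t : List (List Int)} (hs : shapeOK row t) {n : Nat}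
    (hn : n ≤ row) : (t.getD n []).length = row + 1 := by
  have hlt : n < t.length := by rw [hs.1]; omega
  rw [List.getD_eq_getElem?_getD, List.getElem?_eq_getElem hlt]
  exact hs.2 _ (List.getElem_mem hlt)

theorem shapeOK_setN {row : Nat} {t : List (List Int)} (hs : shapeOK row t) (n r : Nat) (v : Int) :
    shapeOK row (setN t n r v) := by
  by_cases hn : n < t.length
  · constructor
    · simp [setN, hs.1]
    · intro rw hrw
      rcases List.mem_or_eq_of_mem_set hrw with h | h
      · exact hs.2 _ h
      · subst h
        rw [List.length_set]
        exact rowLen_of_shape hs (by have := hs.1; omega)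
  · have hset : setN t n r v = t := by
      unfold setN; exact List.set_eq_of_length_le (by omega)
    rw [hset]; exact hs

-- table invariant: every stored entry below the diagonal is 0 (unfilled) or the true value
def tInv (row : Nat) (t : List (List Int)) : Prop :=
  ∀ a b : Nat, a ≤ row → b ≤ row → getN t a b = 0 ∨ (b ≤ a ∧ getN t a b = Cm a b)

-- progress: qc only writes correct values below the diagonal
def prog (row : Nat) (t t' : List (List Int)) : Prop :=
  ∀ a b : Nat, a ≤ row → b ≤ row → getN t' a b = getN t a b ∨ (b ≤ a ∧ getN t' a b = Cm a b)

theorem prog_refl (row : Nat) (t : List (List Int)) : prog row t t := fun _ _ _ _ => Or.inl rfl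

theorem prog_trans {row : Nat} {t1 t2 t3 : List (List Int)} (h1 : prog row t1 t2)
    (h2 : prog row t2 t3) : prog row t1 t3 := by
  intro a b ha hb
  rcases h2 a b ha hb with h | h
  · rcases h1 a b ha hb with h' | h'
    · exact Or.inl (h.trans h')
    · exact Or.inr ⟨h'.1, h.trans h'.2⟩
  · exact Or.inr h

theorem prog_keep {row : Nat} {t t' : List (List Int)} (h : prog row t t') {a b : Nat}
    (ha : a ≤ row) (hb : b ≤ row) (_hba : b ≤ a) (hv : getN t a b = Cm a b) :
    getN t' a b = Cm a b := by
  rcases h a b ha hb with h' | h'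
  · rw [h', hv]
  · exact h'.2

theorem after_set {row : Nat} {t : List (List Int)} (hs : shapeOK row t) (hi : tInv row t)
    {n r : Nat} (hn : n ≤ row) (hrr : r ≤ row) (hrn : r ≤ n) :
    shapeOK row (setN t n r (Cm n r)) ∧ tInv row (setN t n r (Cm n r)) ∧
      prog row t (setN t n r (Cm n r)) ∧ getN (setN t n r (Cm n r)) n r = Cm n r := by
  have hlt : n < t.length := by rw [hs.1]; omega
  have hrl : r < (t.getD n []).length := by rw [rowLen_of_shape hs hn]; omega
  have hself : getN (setN t n r (Cm n r)) n r = Cm n r := getN_setN_self _ hlt hrl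
  refine ⟨shapeOK_setN hs n r _, ?_, ?_, hself⟩
  · intro a b ha hb
    by_cases hab : n = a ∧ r = b
    · rw [← hab.1, ← hab.2, hself]
      exact Or.inr ⟨hrn, rfl⟩
    · rw [getN_setN_ne _ (by tauto)]
      exact hi a b ha hb
  · intro a b ha hb
    by_cases hab : n = a ∧ r = b
    · rw [← hab.1, ← hab.2, hself]
      exact Or.inr ⟨hrn, rfl⟩
    · rw [getN_setN_ne _ (by tauto)]
      exact Or.inl rfl

theorem qc_spec (f : Nat) : ∀ (n r : Nat) (t : List (List Int)), n < f → r ≤ n → ∀ {row : Nat},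
    n ≤ row → shapeOK row t → tInv row t →
    (qc f (n : Int) (r : Int) t).1 = Cm n r ∧
    shapeOK row (qc f (n : Int) (r : Int) t).2 ∧
    tInv row (qc f (n : Int) (r : Int) t).2 ∧
    prog row t (qc f (n : Int) (r : Int) t).2 ∧
    getN (qc f (n : Int) (r : Int) t).2 n r = Cm n r := by
  induction f with
  | zero => intro n r t h; omega
  | succ f ih =>
    intro n r t hf hr row hn hs hi
    by_cases hc1 : ((n : Int) == (r : Int) || (r : Int) == 0) = true
    · -- base case of the recursion: writes 1
      have hor : r = 0 ∨ r = n := by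
        simp only [Bool.or_eq_true, beq_iff_eq] at hc1
        omega
      have hCm : Cm n r = 1 := by rw [Cm, if_pos hor]
      have hres : qc (f + 1) (n : Int) (r : Int) t = (1, setN t n r 1) := by
        simp only [qc, hc1, if_true, set2_natCast]
      rw [hres]
      have h1 : (1 : Int) = Cm n r := hCm.symm
      rw [h1]
      obtain ⟨a1, a2, a3, a4⟩ := after_set hs hi hn (hr.trans hn) hr
      exact ⟨rfl, a1, a2, a3, a4⟩
    · by_cases hc2 : get2 t (n : Int) (r : Int) > 0
      · -- memo hit
        have hres : qc (f + 1) (n : Int) (r : Int) t =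
            (PySem.Int.mod (get2 t (n : Int) (r : Int)) pvMOD, t) := by
          simp only [qc, hc1, Bool.false_eq_true, if_false, hc2, if_true]
        rw [hres]
        rw [get2_natCast] at hc2 ⊢
        have hCm : getN t n r = Cm n r := by
          rcases hi n r hn (hr.trans hn) with h | h
          · omega
          · exact h.2
        refine ⟨?_, hs, hi, prog_refl row t, hCm⟩
        rw [hCm, PySem.Int.mod_eq_emod_of_pos pvMOD_pos,
          Int.emod_eq_of_lt (Cm_nonneg n r) (Cm_lt n r)]
      · -- recursive case
        have hne : r ≠ n ∧ r ≠ 0 := by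
          simp only [Bool.or_eq_true, beq_iff_eq, not_or] at hc1
          constructor <;> [skip; skip] <;> intro h <;> apply hc1.elim <;> omega
        have hr1 : 1 ≤ r := by omega
        have hrn : r < n := by omega
        have e1 : (n : Int) - 1 = ((n - 1 : Nat) : Int) := by omega
        have e2 : (r : Int) - 1 = ((r - 1 : Nat) : Int) := by omega
        obtain ⟨v1, s1, i1, pg1, g1⟩ :=
          ih (n - 1) (r - 1) t (by omega) (by omega) (by omega) hs hi
        obtain ⟨v2, s2, i2, pg2, g2⟩ :=
          ih (n - 1) r (qc f ((n - 1 : Nat) : Int) ((r - 1 : Nat) : Int) t).2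
            (by omega) (by omega) (by omega) s1 i1
        have hv : PySem.Int.mod
            ((qc f ((n - 1 : Nat) : Int) ((r - 1 : Nat) : Int) t).1 +
             (qc f ((n - 1 : Nat) : Int) ((r : Nat) : Int)
               (qc f ((n - 1 : Nat) : Int) ((r - 1 : Nat) : Int) t).2).1) pvMOD = Cm n r := by
          rw [v1, v2, PySem.Int.mod_eq_emod_of_pos pvMOD_pos]
          have := Cm_succ_succ (n - 1) (r - 1) (by omega)
          rw [show n - 1 + 1 = n by omega, show r - 1 + 1 = r by omega] at this
          exact this.symm
        have hres : qc (f + 1) (n : Int) (r : Int) t =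
            (Cm n r, setN (qc f ((n - 1 : Nat) : Int) ((r : Nat) : Int)
               (qc f ((n - 1 : Nat) : Int) ((r - 1 : Nat) : Int) t).2).2 n r (Cm n r)) := by
          simp only [qc, hc1, Bool.false_eq_true, if_false, hc2, e1, e2]
          rw [hv, set2_natCast]
        rw [hres]
        obtain ⟨a1, a2, a3, a4⟩ := after_set s2 i2 hn (hr.trans hn) (by omega)
        exact ⟨rfl, a1, a2, prog_trans (prog_trans pg1 pg2) a3, a4⟩

theorem getN_zeroTable (row a b : Nat) :
    getN (List.replicate (row + 1) (List.replicate (row + 1) (0 : Int))) a b = 0 := by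
  simp only [getN, List.getD_eq_getElem?_getD, List.getElem?_replicate]
  split_ifs <;> simp

theorem innerPA (row i : Nat) (hi : i ≤ row) : ∀ (m : Nat), m ≤ i + 1 → ∀ t, shapeOK row t → tInv row t →
    shapeOK row ((List.range m).foldl (fun t (j : Nat) => (qc (i + 1) (i : Int) (j : Int) t).2) t) ∧
    tInv row ((List.range m).foldl (fun t (j : Nat) => (qc (i + 1) (i : Int) (j : Int) t).2) t) ∧
    prog row t ((List.range m).foldl (fun t (j : Nat) => (qc (i + 1) (i : Int) (j : Int) t).2) t) ∧
    ∀ j, j < m → getN ((List.range m).foldl (fun t (j : Nat) => (qc (i + 1) (i : Int) (j : Int) t).2) t) i j = Cm i j := by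
  intro m
  induction m with
  | zero => intro _ t hs hinv; exact ⟨hs, hinv, prog_refl row t, by omega⟩
  | succ m ihm =>
    intro hm t hs hinv
    simp only [List.range_succ, List.foldl_append, List.foldl_cons, List.foldl_nil]
    obtain ⟨ps, pi, pp, pd⟩ := ihm (by omega) t hs hinv
    obtain ⟨_, qs, qi, qp, qg⟩ := qc_spec (i + 1) i m _ (by omega) (by omega) hi ps pi
    refine ⟨qs, qi, prog_trans pp qp, ?_⟩
    intro j hj
    by_cases hjm : j = m
    · rw [hjm]; exact qg
    · exact prog_keep qp hi ((by omega : j ≤ i).trans hi) (by omega) (pd j (by omega))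

theorem pascalBuildA_spec (row : Nat) : ∀ a b : Nat, a ≤ row → b ≤ row →
    getN (pascalBuildA row) a b = if b ≤ a then Cm a b else 0 := by
  have key : ∀ k, k ≤ row + 1 →
      shapeOK row ((List.range k).foldl (fun t (i : Nat) =>
        (List.range (i + 1)).foldl (fun t (j : Nat) => (qc (i + 1) (i : Int) (j : Int) t).2) t)
        (List.replicate (row + 1) (List.replicate (row + 1) (0 : Int)))) ∧
      tInv row ((List.range k).foldl (fun t (i : Nat) =>
        (List.range (i + 1)).foldl (fun t (j : Nat) => (qc (i + 1) (i : Int) (j : Int) t).2) t)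
        (List.replicate (row + 1) (List.replicate (row + 1) (0 : Int)))) ∧
      prog row (List.replicate (row + 1) (List.replicate (row + 1) (0 : Int)))
        ((List.range k).foldl (fun t (i : Nat) =>
        (List.range (i + 1)).foldl (fun t (j : Nat) => (qc (i + 1) (i : Int) (j : Int) t).2) t)
        (List.replicate (row + 1) (List.replicate (row + 1) (0 : Int)))) ∧
      ∀ i j : Nat, i < k → j ≤ i → getN ((List.range k).foldl (fun t (i : Nat) =>
        (List.range (i + 1)).foldl (fun t (j : Nat) => (qc (i + 1) (i : Int) (j : Int) t).2) t)
        (List.replicate (row + 1) (List.replicate (row + 1) (0 : Int)))) i j = Cm i j := by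
    intro k
    induction k with
    | zero =>
      intro _
      refine ⟨⟨by simp, by simp⟩, ?_, prog_refl _ _, by omega⟩
      intro a b _ _
      exact Or.inl (getN_zeroTable row a b)
    | succ k ihk =>
      intro hk
      rw [List.range_succ, List.foldl_append, List.foldl_cons, List.foldl_nil]
      obtain ⟨ps, pi, pp, pd⟩ := ihk (by omega)
      obtain ⟨is_, ii, ip, id_⟩ := innerPA row k (by omega) (k + 1) (le_refl _) _ ps pi
      refine ⟨is_, ii, prog_trans pp ip, ?_⟩
      intro i j hik hji
      by_cases hikk : i = k
      · subst hikk; exact id_ j (by omega)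
      · exact prog_keep ip (by omega) ((hji.trans (by omega : i ≤ row))) hji (pd i j (by omega) hji)
  intro a b ha hb
  have h := key (row + 1) (le_refl _)
  unfold pascalBuildA
  by_cases hba : b ≤ a
  · rw [if_pos hba]; exact h.2.2.2 a b (by omega) hba
  · rw [if_neg hba]
    rcases h.2.2.1 a b ha hb with h' | h'
    · rw [h']; exact getN_zeroTable row a b
    · omega

-- B's Pascal rows
def rowCm (n : Nat) : List Int := (List.range (n + 1)).map (Cm n)

theorem length_rowCm (n : Nat) : (rowCm n).length = n + 1 := by simp [rowCm]

theorem getElem_rowCm (n k : Nat) (_h : k < n + 1) (h' : k < (rowCm n).length) :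
    (rowCm n)[k] = Cm n k := by
  simp [rowCm]

theorem bRow_rowCm (n : Nat) : bRow (rowCm n) = rowCm (n + 1) := by
  have hmid : ((rowCm n).zip ((rowCm n).drop 1)).map
      (fun p => PySem.Int.mod (p.1 + p.2) pvMOD) =
      (List.range n).map (fun k => Cm (n + 1) (k + 1)) := by
    apply List.ext_getElem
    · simp [length_rowCm]
    · intro k h1 h2
      have hk : k < n := by simpa [length_rowCm] using h2
      simp only [List.getElem_map, List.getElem_zip, List.getElem_drop, List.getElem_range]
      rw [getElem_rowCm n k (by omega) (by simp [length_rowCm]; omega),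
        getElem_rowCm n (1 + k) (by omega) (by simp [length_rowCm]; omega)]
      rw [PySem.Int.mod_eq_emod_of_pos pvMOD_pos, show 1 + k = k + 1 by omega]
      exact (Cm_succ_succ n k (by omega)).symm
  unfold bRow
  rw [hmid]
  have : rowCm (n + 1) = Cm (n + 1) 0 :: ((List.range (n + 1)).map (fun k => Cm (n + 1) (k + 1))) := by
    unfold rowCm
    rw [List.range_succ_eq_map]
    simp [List.map_map, Function.comp]
  rw [this, Cm_zero, List.range_succ, List.map_append]
  simp [Cm_diag]

theorem pasBuildB_eq (row : Nat) : pasBuildB row = (List.range (row + 1)).map rowCm := by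
  induction row with
  | zero =>
    unfold pasBuildB rowCm
    simp [Cm_zero]
  | succ r ih =>
    unfold pasBuildB at ih ⊢
    rw [List.range_succ, List.foldl_append, List.foldl_cons, List.foldl_nil, ih]
    have hne : (List.range (r + 1)).map rowCm ≠ [] := by simp
    rw [PySem.List.pyGetD_neg_one _ _ hne]
    have hlast : ((List.range (r + 1)).map rowCm).getLast hne = rowCm r := by
      rw [List.getLast_eq_getElem]
      simp
    rw [hlast, bRow_rowCm]
    rw [List.range_succ (n := r + 1), List.map_append]
    simp

theorem getN_pasB (row : Nat) (a b : Nat) (ha : a ≤ row) (hb : b ≤ a) :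
    getN (pasBuildB row) a b = Cm a b := by
  have h1 : (pasBuildB row).getD a [] = rowCm a := by
    rw [pasBuildB_eq]
    rw [List.getD_eq_getElem?_getD, List.getElem?_map,
      List.getElem?_range (by omega : a < row + 1)]
    rfl
  unfold getN
  rw [h1, List.getD_eq_getElem?_getD, List.getElem?_eq_getElem (by rw [length_rowCm]; omega)]
  simp only [Option.getD_some]
  exact getElem_rowCm a b (by omega) _

theorem bC_eq (row : Nat) (i n : Int) (h0i : 0 ≤ i) (hi : i ≤ (row : Int)) (h0n : 0 ≤ n) (_hn : n ≤ (row : Int)) :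
    bC (pasBuildB row) i n = getN (pascalBuildA row) i.toNat n.toNat := by
  by_cases h : n ≤ i
  · rw [pascalBuildA_spec row i.toNat n.toNat (by omega) (by omega),
      if_pos (by omega : n.toNat ≤ i.toNat)]
    unfold bC
    rw [if_pos ⟨h0n, h⟩]
    have := getN_pasB row i.toNat n.toNat (by omega) (by omega)
    unfold getN at this
    exact this
  · rw [pascalBuildA_spec row i.toNat n.toNat (by omega) (by omega),
      if_neg (by omega : ¬ n.toNat ≤ i.toNat)]
    unfold bC
    rw [if_neg (by omega)]

-- generic: a fold over range(len l) reading l[i] is a fold over l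
theorem foldl_range_getD {α β : Type} (l : List α) (d : α) (g : β → α → β) (c : β) :
    (List.range l.length).foldl (fun c i => g c (l.getD i d)) c = l.foldl g c := by
  induction l generalizing c with
  | nil => rfl
  | cons x l' ih =>
    rw [List.length_cons, List.range_succ_eq_map, List.foldl_cons, List.foldl_map]
    simp only [List.getD_cons_zero, List.getD_cons_succ]
    exact ih (g c x)

-- counts agree and are bounded
theorem countsA_eq_countsB (a : List (List Int)) (col : Nat) :
    countsA a a.length col = countsB a col := by
  unfold countsA countsB
  rw [PySem.List.foldl_append_singleton_eq_map
    (fun (j : Nat) => (List.range a.length).foldl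
      (fun c (i : Nat) => if get2 a (i : Int) (j : Int) == 1 then c + 1 else c) (0 : Int))]
  rw [List.nil_append]
  apply List.map_congr_left
  intro j _
  have hcol : ∀ (b : List (List Int)) (i : Nat),
      (b.map (fun rw => rw.getD j 0)).getD i 0 = (b.getD i []).getD j 0 := by
    intro b
    induction b with
    | nil => intro i; simp
    | cons x b' ih =>
      intro i
      cases i with
      | zero => simp
      | succ i' => simpa using ih i'
  have hbody : ∀ (c : Int) (i : Nat),
      (if get2 a (i : Int) (j : Int) == 1 then c + 1 else c) =
      (if (a.map (fun rw => rw.getD j 0)).getD i 0 == 1 then c + 1 else c) := by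
    intro c i
    rw [get2_natCast, hcol a i]
    rfl
  simp only [hbody]
  have hlen : a.length = (a.map (fun rw => rw.getD j 0)).length := by simp
  rw [hlen, foldl_range_getD (a.map (fun rw => rw.getD j 0)) 0
    (fun c v => if v == 1 then c + 1 else c) 0]
  rw [PySem.List.foldl_count_if (fun v => v == 1) _ 0]
  simp

theorem countsB_bounds (a : List (List Int)) (col : Nat) {j : Nat} (d : Int) (hj : j < col) :
    0 ≤ (countsB a col).getD j d ∧ (countsB a col).getD j d ≤ (a.length : Int) := by
  unfold countsB
  rw [List.getD_eq_getElem?_getD, List.getElem?_map, List.getElem?_range hj]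
  simp only [Option.map_some, Option.getD_some]
  constructor
  · positivity
  · have := List.countP_le_length (l := a.map (fun rw => rw.getD j 0)) (p := fun v => v == 1)
    simp at this ⊢
    omega

theorem length_countsB (a : List (List Int)) (col : Nat) : (countsB a col).length = col := by
  simp [countsB]

-- 1-D reference form of A's innermost loop
def nLoop1 (pascal : List (List Int)) (row : Nat) (c : Int) (i : Nat) (v : Int) (nxt : List Int) : List Int :=
  (PySem.List.pyRange 0 (c + 1) 1).foldl (fun nxt n =>
    let nn := ((i : Int) - n) + (c - n)
    if nn > (row : Int) || (row : Int) < n then nxt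
    else nxt.set nn.toNat (nxt.getD nn.toNat 0 +
      PySem.Int.mod (v * PySem.Int.mod (get2 pascal (i : Int) n * get2 pascal ((row : Int) - (i : Int)) (c - n)) pvMOD) pvMOD)) nxt

-- 1-D reference form of A's i-loop, reading from cur and accumulating into nxt
def stepRef (pascal : List (List Int)) (row : Nat) (c : Int) (cur : List Int) : List Int :=
  (List.range (row + 1)).foldl (fun nxt i =>
    if cur.getD i 0 == 0 then nxt else nLoop1 pascal row c i (cur.getD i 0) nxt)
    (List.replicate (row + 1) (0 : Int))

theorem getD_set_self' {α : Type} (l : List α) (i : Nat) (x d : α) (h : i < l.length) :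
    (l.set i x).getD i d = x := by
  simp [List.getD_eq_getElem?_getD, h]

theorem getD_set_ne' {α : Type} (l : List α) (i k : Nat) (x d : α) (h : i ≠ k) :
    (l.set i x).getD k d = l.getD k d := by
  simp [List.getD_eq_getElem?_getD, h]

theorem set_getD_self (l : List (List Int)) (i : Nat) (h : i < l.length) :
    l.set i (l.getD i []) = l := by
  rw [List.getD_eq_getElem?_getD, List.getElem?_eq_getElem h]
  simp [List.set_getElem_self]

theorem nLoopA_eq (pascal : List (List Int)) (row : Nat) (cj : Int) (j i : Nat)
    (dp : List (List Int)) (hj : j + 1 < dp.length) :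
    nLoopA pascal row cj (j : Int) i dp =
      dp.set (j + 1) (nLoop1 pascal row cj i (getN dp j i) (dp.getD (j + 1) [])) := by
  have key : ∀ (L : List Int) (nxt : List Int),
      L.foldl (fun dp n =>
        let nn := ((i : Int) - n) + (cj - n)
        if nn > (row : Int) || (row : Int) < n then dp
        else
          let count := PySem.Int.mod (get2 pascal (i : Int) n * get2 pascal ((row : Int) - (i : Int)) (cj - n)) pvMOD
          set2 dp ((j : Int) + 1) nn (get2 dp ((j : Int) + 1) nn + PySem.Int.mod (get2 dp (j : Int) (i : Int) * count) pvMOD))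
        (dp.set (j + 1) nxt) =
      dp.set (j + 1) (L.foldl (fun nxt n =>
        let nn := ((i : Int) - n) + (cj - n)
        if nn > (row : Int) || (row : Int) < n then nxt
        else nxt.set nn.toNat (nxt.getD nn.toNat 0 +
          PySem.Int.mod (getN dp j i * PySem.Int.mod (get2 pascal (i : Int) n * get2 pascal ((row : Int) - (i : Int)) (cj - n)) pvMOD) pvMOD)) nxt) := by
    intro L
    induction L with
    | nil => intro nxt; rfl
    | cons n L ihL =>
      intro nxt
      simp only [List.foldl_cons]
      by_cases hg : ((((i : Int) - n) + (cj - n) > (row : Int)) || ((row : Int) < n)) = true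
      · simp only [hg, if_true]
        exact ihL nxt
      · simp only [hg, Bool.false_eq_true, if_false]
        have hj1 : ((j : Int) + 1) = (((j + 1 : Nat)) : Int) := by push_cast; ring
        have e1 : get2 (dp.set (j + 1) nxt) ((j : Int) + 1) (((i : Int) - n) + (cj - n)) =
            nxt.getD (((i : Int) - n) + (cj - n)).toNat 0 := by
          rw [hj1]
          simp only [get2, Int.toNat_natCast]
          rw [getD_set_self' _ _ _ _ hj]
        have e2 : get2 (dp.set (j + 1) nxt) (j : Int) (i : Int) = getN dp j i := by
          simp only [get2, getN, Int.toNat_natCast]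
          rw [getD_set_ne' _ _ _ _ _ (by omega)]
        have e3 : ∀ X : Int, set2 (dp.set (j + 1) nxt) ((j : Int) + 1) (((i : Int) - n) + (cj - n)) X =
            dp.set (j + 1) (nxt.set (((i : Int) - n) + (cj - n)).toNat X) := by
          intro X
          rw [hj1]
          simp only [set2, Int.toNat_natCast]
          rw [getD_set_self' _ _ _ _ hj, List.set_set]
        simp only [e1, e2, e3]
        exact ihL _
  have hdp : dp = dp.set (j + 1) (dp.getD (j + 1) []) := (set_getD_self dp (j + 1) hj).symm
  unfold nLoopA nLoop1
  conv_lhs => rw [hdp]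
  exact key _ _

theorem iLoopA_eq (pascal : List (List Int)) (row : Nat) (cj : Int) (j : Nat)
    (dp : List (List Int)) (hj : j + 1 < dp.length) :
    iLoopA pascal row cj (j : Int) dp = dp.set (j + 1)
      ((List.range (row + 1)).foldl (fun nxt i =>
        if getN dp j i == 0 then nxt else nLoop1 pascal row cj i (getN dp j i) nxt)
        (dp.getD (j + 1) [])) := by
  have key : ∀ (L : List Nat) (nxt : List Int),
      L.foldl (fun dp (i : Nat) =>
        if get2 dp (j : Int) (i : Int) == 0 then dp else nLoopA pascal row cj (j : Int) i dp)
        (dp.set (j + 1) nxt) =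
      dp.set (j + 1) (L.foldl (fun nxt (i : Nat) =>
        if getN dp j i == 0 then nxt else nLoop1 pascal row cj i (getN dp j i) nxt) nxt) := by
    intro L
    induction L with
    | nil => intro nxt; rfl
    | cons i L ihL =>
      intro nxt
      simp only [List.foldl_cons]
      have e2 : get2 (dp.set (j + 1) nxt) (j : Int) (i : Int) = getN dp j i := by
        simp only [get2, getN, Int.toNat_natCast]
        rw [getD_set_ne' _ _ _ _ _ (by omega)]
      rw [e2]
      by_cases hz : (getN dp j i == 0) = true
      · simp only [hz, if_true]
        exact ihL nxt
      · simp only [hz, Bool.false_eq_true, if_false]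
        have hset : nLoopA pascal row cj (j : Int) i (dp.set (j + 1) nxt) =
            dp.set (j + 1) (nLoop1 pascal row cj i (getN dp j i) nxt) := by
          rw [nLoopA_eq pascal row cj j i (dp.set (j + 1) nxt) (by simp [hj])]
          have r1 : getN (dp.set (j + 1) nxt) j i = getN dp j i := by
            unfold getN
            rw [getD_set_ne' _ _ _ _ _ (by omega)]
          have r2 : (dp.set (j + 1) nxt).getD (j + 1) [] = nxt := getD_set_self' _ _ _ _ hj
          rw [r1, r2, List.set_set]
        rw [hset]
        exact ihL _
  have hdp : dp = dp.set (j + 1) (dp.getD (j + 1) []) := (set_getD_self dp (j + 1) hj).symm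
  unfold iLoopA
  conv_lhs => rw [hdp]
  exact key _ _

-- B's per-column step is the reference step
theorem colStepB_eq (row : Nat) (cur : List Int) (c : Int)
    (hlen : cur.length = row + 1) (_hc0 : 0 ≤ c) (hcr : c ≤ (row : Int)) :
    colStepB (pasBuildB row) row cur c = stepRef (pascalBuildA row) row c cur := by
  unfold colStepB stepRef
  rw [PySem.List.enumerate_eq_map_pyRange cur 0, List.foldl_map]
  have hlen2 : PySem.List.len cur = ((row + 1 : Nat) : Int) := by
    rw [PySem.List.len_eq, hlen]
  rw [hlen2, PySem.List.pyRange_one, List.foldl_map]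
  simp only [Int.sub_zero, Int.toNat_natCast, zero_add]
  apply PySem.List.foldl_congr_mem
  intro nxt k hk
  have hkr : k < row + 1 := List.mem_range.mp hk
  rw [PySem.List.pyGetD_natCast]
  by_cases hv : (cur.getD k 0 == 0) = true
  · simp only [hv, if_true]
  · simp only [hv, Bool.false_eq_true, if_false]
    unfold nLoopB nLoop1
    apply PySem.List.foldl_congr_mem
    intro nxt' n hn
    have hnb : 0 ≤ n ∧ n < c + 1 := PySem.List.mem_pyRange_one.mp hn
    have hrn : ¬ ((row : Int) < n) := by omega
    have hb1 : bC (pasBuildB row) (k : Int) n = get2 (pascalBuildA row) (k : Int) n := by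
      rw [bC_eq row (k : Int) n (by omega) (by omega) (by omega) (by omega)]
      simp [get2, getN]
    have hb2 : bC (pasBuildB row) ((row : Int) - (k : Int)) (c - n) =
        get2 (pascalBuildA row) ((row : Int) - (k : Int)) (c - n) := by
      rw [bC_eq row _ _ (by omega) (by omega) (by omega) (by omega)]
      simp [get2, getN]
    rw [hb1, hb2]
    by_cases hnn : ((k : Int) - n) + (c - n) ≤ (row : Int)
    · have hg : ((((k : Int) - n) + (c - n) > (row : Int)) || ((row : Int) < n)) = false := by
        simp only [Bool.or_eq_false_iff, decide_eq_false_iff_not]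
        omega
      simp only [if_pos hnn, hg, Bool.false_eq_true, if_false]
    · have hg : ((((k : Int) - n) + (c - n) > (row : Int)) || ((row : Int) < n)) = true := by
        simp only [Bool.or_eq_true, decide_eq_true_eq]
        omega
      simp only [if_neg hnn, hg, if_true]

theorem length_nLoop1 (pascal : List (List Int)) (row : Nat) (c : Int) (i : Nat) (v : Int)
    (nxt : List Int) : (nLoop1 pascal row c i v nxt).length = nxt.length := by
  unfold nLoop1
  generalize PySem.List.pyRange 0 (c + 1) 1 = L
  induction L generalizing nxt with
  | nil => rfl
  | cons n L ihL =>
    simp only [List.foldl_cons]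
    by_cases hg : ((((i : Int) - n) + (c - n) > (row : Int)) || ((row : Int) < n)) = true
    · simp only [hg, if_true]
      exact ihL nxt
    · simp only [hg, Bool.false_eq_true, if_false]
      rw [ihL]
      exact List.length_set ..

theorem length_stepRef (pascal : List (List Int)) (row : Nat) (c : Int) (cur : List Int) :
    (stepRef pascal row c cur).length = row + 1 := by
  unfold stepRef
  have key : ∀ (L : List Nat) (nxt : List Int),
      (L.foldl (fun nxt i =>
        if cur.getD i 0 == 0 then nxt else nLoop1 pascal row c i (cur.getD i 0) nxt) nxt).length = nxt.length := by
    intro L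
    induction L with
    | nil => intro nxt; rfl
    | cons i L ihL =>
      intro nxt
      simp only [List.foldl_cons]
      by_cases hz : (cur.getD i 0 == 0) = true
      · simp only [hz, if_true]; exact ihL nxt
      · simp only [hz, Bool.false_eq_true, if_false]
        rw [ihL, length_nLoop1]
  rw [key]
  exact List.length_replicate

-- A's dp loop after m steps / B's rolling array after m steps
def dpA (pascal : List (List Int)) (counts : List Int) (row : Nat) (dp1 : List (List Int)) (m : Nat) : List (List Int) :=
  (PySem.List.pyRange 1 (1 + (m : Int)) 1).foldl
    (fun dp j => iLoopA pascal row (counts.getD j.toNat 0) j dp) dp1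

def curB (pas : List (List Int)) (counts : List Int) (row : Nat) (cur0 : List Int) (m : Nat) : List Int :=
  ((counts.drop 1).take m).foldl (colStepB pas row) cur0

theorem dpA_succ (pascal : List (List Int)) (counts : List Int) (row : Nat)
    (dp1 : List (List Int)) (m : Nat) :
    dpA pascal counts row dp1 (m + 1) =
      iLoopA pascal row (counts.getD (m + 1) 0) (((m + 1 : Nat)) : Int) (dpA pascal counts row dp1 m) := by
  unfold dpA
  have h1 : (1 + ((m + 1 : Nat) : Int)) = (1 + (m : Int)) + 1 := by push_cast; ring
  rw [h1, PySem.List.pyRange_one_succ_right (by omega), List.foldl_append, List.foldl_cons, List.foldl_nil]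
  have h2 : (1 + (m : Int)) = ((m + 1 : Nat) : Int) := by push_cast; ring
  rw [h2, Int.toNat_natCast]

theorem curB_succ (pas : List (List Int)) (counts : List Int) (row : Nat) (cur0 : List Int)
    (m : Nat) (hm : m < counts.length - 1) :
    curB pas counts row cur0 (m + 1) =
      colStepB pas row (curB pas counts row cur0 m) (counts.getD (m + 1) 0) := by
  unfold curB
  have hmd : m < (counts.drop 1).length := by simp; omega
  rw [List.take_add_one, List.getElem?_eq_getElem hmd]
  have hel : (counts.drop 1)[m] = counts.getD (m + 1) 0 := by
    rw [List.getElem_drop, List.getD_eq_getElem?_getD,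
      List.getElem?_eq_getElem (by omega : m + 1 < counts.length)]
    simp only [Option.getD_some]
    congr 1
    omega
  rw [hel]
  simp [List.foldl_append]

theorem dpInv (row col : Nat) (counts : List Int) (hlen : counts.length = col)
    (hb : ∀ j : Nat, j < col → 0 ≤ counts.getD j 0 ∧ counts.getD j 0 ≤ (row : Int))
    (hcol : 1 ≤ col) (cur0 : List Int) (hc0 : cur0.length = row + 1) :
    ∀ m : Nat, m ≤ col - 1 →
      (dpA (pascalBuildA row) counts row
        ((List.replicate (col + 1) (List.replicate (row + 1) (0 : Int))).set 1 cur0) m).length = col + 1 ∧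
      (curB (pasBuildB row) counts row cur0 m).length = row + 1 ∧
      (dpA (pascalBuildA row) counts row
        ((List.replicate (col + 1) (List.replicate (row + 1) (0 : Int))).set 1 cur0) m).getD (m + 1) [] =
        curB (pasBuildB row) counts row cur0 m ∧
      (∀ t : Nat, m + 2 ≤ t → t ≤ col →
        (dpA (pascalBuildA row) counts row
          ((List.replicate (col + 1) (List.replicate (row + 1) (0 : Int))).set 1 cur0) m).getD t [] =
          List.replicate (row + 1) (0 : Int)) := by
  intro m
  induction m with
  | zero =>
    intro _
    have hd : dpA (pascalBuildA row) counts row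
        ((List.replicate (col + 1) (List.replicate (row + 1) (0 : Int))).set 1 cur0) 0 =
        (List.replicate (col + 1) (List.replicate (row + 1) (0 : Int))).set 1 cur0 := by
      unfold dpA
      rw [show (1 + ((0 : Nat) : Int)) = 1 by norm_num, PySem.List.pyRange_one_eq_nil (by omega)]
      rfl
    have hcc : curB (pasBuildB row) counts row cur0 0 = cur0 := rfl
    rw [hd, hcc]
    refine ⟨by simp, hc0, ?_, ?_⟩
    · exact getD_set_self' _ _ _ _ (by simp; omega)
    · intro t ht1 ht2
      rw [getD_set_ne' _ _ _ _ _ (by omega)]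
      rw [List.getD_eq_getElem?_getD, List.getElem?_replicate, if_pos (by omega)]
      rfl
  | succ m ihm =>
    intro hm
    obtain ⟨l1, l2, l3, l4⟩ := ihm (by omega)
    have hc := hb (m + 1) (by omega)
    have hstep : dpA (pascalBuildA row) counts row
        ((List.replicate (col + 1) (List.replicate (row + 1) (0 : Int))).set 1 cur0) (m + 1) =
        (dpA (pascalBuildA row) counts row
          ((List.replicate (col + 1) (List.replicate (row + 1) (0 : Int))).set 1 cur0) m).set (m + 2)
          (stepRef (pascalBuildA row) row (counts.getD (m + 1) 0)
            (curB (pasBuildB row) counts row cur0 m)) := by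
      rw [dpA_succ]
      rw [iLoopA_eq _ row _ (m + 1) _ (by rw [l1]; omega)]
      congr 1
      rw [l4 (m + 2) (by omega) (by omega)]
      unfold stepRef
      simp only [getN, l3]
    have hcur : curB (pasBuildB row) counts row cur0 (m + 1) =
        stepRef (pascalBuildA row) row (counts.getD (m + 1) 0)
          (curB (pasBuildB row) counts row cur0 m) := by
      rw [curB_succ _ _ _ _ _ (by omega)]
      exact colStepB_eq row _ _ l2 hc.1 hc.2
    refine ⟨?_, ?_, ?_, ?_⟩
    · rw [hstep, List.length_set, l1]
    · rw [hcur]; exact length_stepRef _ _ _ _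
    · rw [hstep, hcur]
      exact getD_set_self' _ _ _ _ (by rw [l1]; omega)
    · intro t ht1 ht2
      rw [hstep, getD_set_ne' _ _ _ _ _ (by omega)]
      exact l4 t (by omega) ht2

theorem main_eq (a : List (List Int)) (hcol : 0 < (a.headD []).length) :
    solution a = solution_alt a := by
  simp only [solution, solution_alt]
  rw [countsA_eq_countsB]
  have hrow : a.length = a.length := rfl
  set row := a.length with hr
  set col := (a.headD []).length with hc
  set counts := countsB a col with hcounts
  set pascal := pascalBuildA row with hp
  set pas := pasBuildB row with hpas
  have hlen : counts.length = col := length_countsB a col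
  have hb : ∀ j : Nat, j < col → 0 ≤ counts.getD j 0 ∧ counts.getD j 0 ≤ (row : Int) := by
    intro j hj
    exact countsB_bounds a col 0 hj
  have hk0 := hb 0 hcol
  set k0 : Int := (row : Int) - counts.getD 0 0 with hk
  have hk0b : 0 ≤ k0 ∧ k0 ≤ (row : Int) := by omega
  -- the two initial arrays agree
  have hV : get2 pascal (row : Int) k0 = bC pas (row : Int) k0 := by
    rw [hpas, hp, bC_eq row _ _ (by omega) (by omega) hk0b.1 hk0b.2]
    simp [get2, getN]
  set cur0 : List Int := (List.replicate (row + 1) (0 : Int)).set k0.toNat (bC pas (row : Int) k0) with hcur0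
  have hc0len : cur0.length = row + 1 := by simp [hcur0]
  have hdp1 : set2 (List.replicate (col + 1) (List.replicate (row + 1) (0 : Int))) 1 k0
      (get2 pascal (row : Int) k0) =
      (List.replicate (col + 1) (List.replicate (row + 1) (0 : Int))).set 1 cur0 := by
    unfold set2
    have h1 : (1 : Int).toNat = 1 := rfl
    rw [h1]
    congr 1
    rw [List.getD_eq_getElem?_getD, List.getElem?_replicate, if_pos (by omega)]
    rw [hV, hcur0]
    rfl
  rw [hdp1]
  -- identify the loops with dpA / curB at m = col - 1
  have hcolInt : (col : Int) = 1 + ((col - 1 : Nat) : Int) := by omega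
  have hA : (PySem.List.pyRange 1 (col : Int) 1).foldl
      (fun dp j => iLoopA pascal row (counts.getD j.toNat 0) j dp)
      ((List.replicate (col + 1) (List.replicate (row + 1) (0 : Int))).set 1 cur0) =
      dpA pascal counts row
        ((List.replicate (col + 1) (List.replicate (row + 1) (0 : Int))).set 1 cur0) (col - 1) := by
    unfold dpA
    rw [hcolInt]
  have hB : (counts.drop 1).foldl (colStepB pas row) cur0 =
      curB pas counts row cur0 (col - 1) := by
    unfold curB
    rw [List.take_of_length_le (by simp [hlen])]
  rw [hA, hB]
  obtain ⟨l1, l2, l3, l4⟩ := dpInv row col counts hlen hb hcol cur0 hc0len (col - 1) (le_refl _)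
  have hcolN : col - 1 + 1 = col := by omega
  rw [hcolN] at l3
  rw [hp, hpas]
  rw [get2_natCast]
  unfold getN
  rw [l3]

-- ===== VERDICT (by name: the statement is the Claim_ definition above) =====
theorem solution_spec : Claim_equal_solution := by
  intro a _ hpre
  unfold Spec_solution
  exact main_eq a hpre.2.1
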